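-- pv_equiv track=rewrite | github.com/cognitivecomputations/laserRMT | laser_scanner.py | sort_weight_types
-- ===== SOURCE A (Python) =====
-- def sort_weight_types(weight_types):
--     categories = {}
--     for wt in weight_types:
--         category = wt.split('.')[0]
--         categories.setdefault(category, []).append(wt)
--     sorted_categories = {k: sorted(v) for k, v in sorted(categories.items(), key=lambda item: item[0])}
--     sorted_weight_types = [wt for sublist in sorted_categories.values() for wt in sublist]
--     return sorted_weight_types
-- ===== SOURCE B (Python) =====
-- def sort_weight_types(weight_types):
--     return sorted(weight_types, key=lambda wt: (wt.split('.')[0], wt))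
-- ===== Notes on version B (the rewrite author's own statement) =====
-- stated objective: simpler
-- what changed: A builds a dict grouping weight types by their before-the-first-dot prefix, sorts the buckets and their keys, and flattens; B does one stable sort with the composite key (prefix, full string), maintaining no grouping table at all (constant-factor win: no dict building, one sort pass).
import Mathlib
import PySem

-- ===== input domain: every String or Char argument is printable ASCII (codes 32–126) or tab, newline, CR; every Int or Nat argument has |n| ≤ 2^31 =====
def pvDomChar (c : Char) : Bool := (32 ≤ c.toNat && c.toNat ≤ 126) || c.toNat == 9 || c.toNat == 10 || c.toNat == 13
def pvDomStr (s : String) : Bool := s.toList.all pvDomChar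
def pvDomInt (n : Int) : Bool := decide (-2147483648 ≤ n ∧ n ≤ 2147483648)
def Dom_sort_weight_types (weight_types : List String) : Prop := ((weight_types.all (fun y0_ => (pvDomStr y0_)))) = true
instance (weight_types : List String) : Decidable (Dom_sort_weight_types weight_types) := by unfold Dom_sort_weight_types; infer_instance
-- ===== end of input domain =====

-- B replaces A's grouping dict + per-bucket sorts + flatten by one stable sort on the
-- composite key (prefix before the first '.', full string): simpler, same O(n log n) cost.

-- shared helper: Python's wt.split('.')[0] (split? is some on the nonempty separator ".",
-- and the split list is never empty, so the defaults are never taken)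
def pvPrefix (wt : String) : String := ((PySem.Str.split? wt ".").getD []).headD ""

-- ===== PORT A =====
def sort_weight_types (weight_types : List String) : List String :=
  let categories : PySem.Dict String (List String) :=
    weight_types.foldl (fun d wt => d.modify (pvPrefix wt) [] (fun l => l ++ [wt])) PySem.Dict.empty
  let sorted_categories : PySem.Dict String (List String) :=
    PySem.Dict.ofList ((PySem.List.sorted categories.items (fun it => it.1)).map
      (fun it => (it.1, PySem.List.sorted it.2 (fun x => x))))
  sorted_categories.values.flatten

-- ===== PORT B =====
def sort_weight_types_alt (weight_types : List String) : List String :=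
  PySem.List.sorted2 weight_types (fun wt => pvPrefix wt) (fun wt => wt)

-- ===== PRECONDITION & SPEC =====
def Spec_sort_weight_types (weight_types : List String) (out : List String) : Prop := out = sort_weight_types_alt weight_types
instance (weight_types : List String) (out : List String) : Decidable (Spec_sort_weight_types weight_types out) := by unfold Spec_sort_weight_types; infer_instance

-- ===== CLAIM (what is proved, stated in full; the proofs are below) =====
def Claim_equal_sort_weight_types : Prop := ∀ (weight_types : List String), Dom_sort_weight_types weight_types → Spec_sort_weight_types weight_types (sort_weight_types weight_types)

-- ===== LEMMAS AND PROOFS =====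

-- sorted2 with string keys is sorted under the lexicographic product order
theorem pv_sorted2_eq_sorted_lex {α : Type} (xs : List α) (k1 k2 : α → String) :
    PySem.List.sorted2 xs k1 k2 = PySem.List.sorted xs (fun x => toLex (k1 x, k2 x)) := by
  rw [PySem.List.sorted_eq_foldl_insertBy]
  show List.foldl (fun acc x => PySem.List.insertBy
      (fun a b => decide (k1 a < k1 b) || (!decide (k1 b < k1 a) && decide (k2 a < k2 b))) x acc) [] xs = _
  congr 1
  funext acc x
  congr 1
  funext a b
  apply Bool.eq_iff_iff.mpr
  simp only [Bool.or_eq_true, Bool.and_eq_true, Bool.not_eq_true', decide_eq_true_eq,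
    decide_eq_false_iff_not, Prod.Lex.toLex_lt_toLex]
  constructor
  · rintro (h | ⟨h1, h2⟩)
    · exact Or.inl h
    · rcases lt_trichotomy (k1 a) (k1 b) with h' | h' | h'
      · exact Or.inl h'
      · exact Or.inr ⟨h', h2⟩
      · exact absurd h' h1
  · rintro (h | ⟨h1, h2⟩)
    · exact Or.inl h
    · exact Or.inr ⟨fun hlt => absurd hlt (by rw [h1]; exact lt_irrefl _), h2⟩

-- the grouping loop computes, per key, the filter of the input
theorem pv_getD_group (xs : List String) (d : PySem.Dict String (List String)) (k : String) :
    (xs.foldl (fun d wt => d.modify (pvPrefix wt) [] (fun l => l ++ [wt])) d).getD k []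
      = d.getD k [] ++ xs.filter (fun w => pvPrefix w == k) := by
  induction xs generalizing d with
  | nil => simp
  | cons x t ih =>
    simp only [List.foldl_cons, List.filter_cons, ih, PySem.Dict.getD_modify]
    by_cases h : k = pvPrefix x
    · simp [h, List.append_assoc]
    · have h' : ¬ pvPrefix x = k := fun hh => h hh.symm
      simp [h, h']

-- the per-key filters of xs over a duplicate-free, exhaustive key list partition xs
theorem pv_flatten_filter_perm (K : List String) (xs : List String) (hnd : K.Nodup)
    (hall : ∀ x ∈ xs, pvPrefix x ∈ K) :
    (K.map (fun k => xs.filter (fun w => pvPrefix w == k))).flatten.Perm xs := by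
  induction K generalizing xs with
  | nil =>
    have : xs = [] := List.eq_nil_iff_forall_not_mem.mpr (fun x hx => by simpa using hall x hx)
    simp [this]
  | cons k K ih =>
    obtain ⟨hk, hndK⟩ := List.nodup_cons.mp hnd
    have hsub : ∀ k' ∈ K, xs.filter (fun w => pvPrefix w == k')
        = (xs.filter (fun w => !(pvPrefix w == k))).filter (fun w => pvPrefix w == k') := by
      intro k' hk'
      have hne : k' ≠ k := fun e => hk (e ▸ hk')
      rw [List.filter_filter]
      apply List.filter_congr
      intro w _
      by_cases h : pvPrefix w = k'
      · simp [h, hne]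
      · simp [h]
    have hall' : ∀ x ∈ xs.filter (fun w => !(pvPrefix w == k)), pvPrefix x ∈ K := by
      intro x hx
      obtain ⟨hxm, hxp⟩ := List.mem_filter.mp hx
      have := hall x hxm
      simp only [Bool.not_eq_eq_eq_not, Bool.not_true, beq_eq_false_iff_ne, ne_eq] at hxp
      simpa [hxp] using this
    simp only [List.map_cons, List.flatten_cons]
    rw [List.map_congr_left hsub]
    exact List.Perm.trans (List.Perm.append_left _ (ih _ hndK hall')) (List.filter_append_perm _ xs)

theorem sort_weight_types_spec_aux (xs : List String) :
    sort_weight_types xs = sort_weight_types_alt xs := by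
  -- names
  set G : PySem.Dict String (List String) :=
    xs.foldl (fun d wt => d.modify (pvPrefix wt) [] (fun l => l ++ [wt])) PySem.Dict.empty with hG
  set S : List String := PySem.List.sorted (PySem.Set.ofList (xs.map pvPrefix)) (fun x => x) with hS
  have hK : G.keys = PySem.Set.ofList (xs.map pvPrefix) := by
    rw [hG, PySem.Dict.keys_foldl_modify_key]
    rfl
  have hnodK : G.keys.Nodup := by rw [hK]; exact PySem.Set.nodup_ofList _
  have hSperm : S.Perm G.keys := by rw [hK]; exact PySem.List.sorted_perm _ _ _
  have hSnd : S.Nodup := hSperm.nodup_iff.mpr hnodK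
  have hSlt : S.Pairwise (· < ·) := PySem.List.sorted_ofList_pairwise_lt _
  have hSall : ∀ x ∈ xs, pvPrefix x ∈ S := by
    intro x hx
    rw [hS, PySem.List.mem_sorted, PySem.Set.mem_ofList]
    exact List.mem_map_of_mem hx
  -- A's grouping dict, itemized
  have hitems : G.items = G.keys.map (fun k => (k, xs.filter (fun w => pvPrefix w == k))) := by
    rw [PySem.Dict.items_eq_map_keys G hnodK []]
    apply List.map_congr_left
    intro k _
    rw [hG, pv_getD_group]
    simp
  -- sorting the items by key = mapping over the sorted distinct keys
  have hsorteditems : PySem.List.sorted G.items (fun it => it.1)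
      = S.map (fun k => (k, xs.filter (fun w => pvPrefix w == k))) := by
    apply PySem.List.sorted_eq_of_perm_of_pairwise_lt
    · rw [hitems]; exact hSperm.map _
    · exact hSlt.map _ (fun a b h => h)
  -- A's result
  have hL : (PySem.List.sorted G.items (fun it => it.1)).map (fun it => (it.1, PySem.List.sorted it.2 (fun x => x)))
      = S.map (fun k => (k, PySem.List.sorted (xs.filter (fun w => pvPrefix w == k)) (fun x => x))) := by
    rw [hsorteditems, List.map_map]
    rfl
  have hA : sort_weight_types xs
      = (S.map (fun k => PySem.List.sorted (xs.filter (fun w => pvPrefix w == k)) (fun x => x))).flatten := by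
    show ((PySem.Dict.ofList ((PySem.List.sorted G.items (fun it => it.1)).map
        (fun it => (it.1, PySem.List.sorted it.2 (fun x => x))))).values).flatten = _
    rw [hL]
    have hfresh : ∀ a ∈ S.map (fun k => (k, PySem.List.sorted (xs.filter (fun w => pvPrefix w == k)) (fun x => x))),
        (PySem.Dict.empty : PySem.Dict String (List String)).contains a.1 = false := by
      intro a _; simp [PySem.Dict.contains_empty]
    have hkeysnd : ((S.map (fun k => (k, PySem.List.sorted (xs.filter (fun w => pvPrefix w == k)) (fun x => x)))).map Prod.fst).Nodup := by
      rw [List.map_map]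
      simpa [Function.comp_def] using hSnd
    have hit := PySem.Dict.items_foldl_insert_fresh
      (S.map (fun k => (k, PySem.List.sorted (xs.filter (fun w => pvPrefix w == k)) (fun x => x))))
      Prod.fst Prod.snd PySem.Dict.empty hfresh hkeysnd
    show (((PySem.Dict.ofList (S.map (fun k => (k, PySem.List.sorted (xs.filter (fun w => pvPrefix w == k)) (fun x => x))))).items).map Prod.snd).flatten = _
    show (((S.map (fun k => (k, PySem.List.sorted (xs.filter (fun w => pvPrefix w == k)) (fun x => x)))).foldl (fun d a => d.insert a.1 a.2) (PySem.Dict.empty : PySem.Dict String (List String))).items.map Prod.snd).flatten = _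
    rw [hit]
    simp [List.map_map, Function.comp_def, PySem.Dict.empty]
  -- B's result
  have hB : sort_weight_types_alt xs
      = PySem.List.sorted xs (fun w => toLex (pvPrefix w, w)) := by
    exact pv_sorted2_eq_sorted_lex xs _ _
  rw [hA, hB]
  -- both are permutations of xs, pairwise sorted under the injective lex key
  apply PySem.List.eq_of_perm_of_pairwise_le_of_injective (fun w => toLex (pvPrefix w, w))
  · intro a b h
    have := congrArg (fun p : Lex (String × String) => (ofLex p).2) h
    simpa using this
  · -- Perm
    refine List.Perm.trans ?_ (PySem.List.sorted_perm xs _ _).symm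
    refine List.Perm.trans (List.Perm.flatten_congr ?_) (pv_flatten_filter_perm S xs hSnd hSall)
    rw [List.forall₂_map_right_iff, List.forall₂_map_left_iff]
    exact List.forall₂_same.mpr (fun k _ => PySem.List.sorted_perm _ _ _)
  · -- Pairwise on A's side
    rw [List.pairwise_flatten]
    constructor
    · intro l hl
      obtain ⟨k, _, rfl⟩ := List.mem_map.mp hl
      refine (PySem.List.sorted_pairwise _ _).imp_of_mem ?_
      intro a b ha hb hab
      have hpa : pvPrefix a = k := by
        have := (List.mem_filter.mp ((PySem.List.mem_sorted _ _ _ _).mp ha)).2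
        simpa using this
      have hpb : pvPrefix b = k := by
        have := (List.mem_filter.mp ((PySem.List.mem_sorted _ _ _ _).mp hb)).2
        simpa using this
      rw [Prod.Lex.toLex_le_toLex]
      exact Or.inr ⟨by rw [hpa, hpb], hab⟩
    · refine hSlt.map _ ?_
      intro k1 k2 hlt a ha b hb
      have hpa : pvPrefix a = k1 := by
        have := (List.mem_filter.mp ((PySem.List.mem_sorted _ _ _ _).mp ha)).2
        simpa using this
      have hpb : pvPrefix b = k2 := by
        have := (List.mem_filter.mp ((PySem.List.mem_sorted _ _ _ _).mp hb)).2
        simpa using this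
      rw [Prod.Lex.toLex_le_toLex]
      exact Or.inl (by rw [hpa, hpb]; exact hlt)
  · -- Pairwise on B's side
    exact PySem.List.sorted_pairwise _ _

-- ===== VERDICT (by name: the statement is the Claim_ definition above) =====
theorem sort_weight_types_spec : Claim_equal_sort_weight_types := by
  intro weight_types _
  exact sort_weight_types_spec_aux weight_types
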